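-- pv_equiv track=rewrite | github.com/Maritzaspott/COMP5130-UG1 | utils.py | calc_set_frequency
-- ===== SOURCE A (Python) =====
-- def calc_set_frequency(dataset: list, itemsets: list) -> list:
--     """
--         :param dataset: a dataset of items in a comma separated list
--         :param itemsets: a list of unique items in itemsets to evaluate
--         :return: a list of the frequencies associated with the given itemsets
--     """
--     frequency = []
--     for index, itemset in enumerate(itemsets):
--         frequency.append(0)
--
--     for subset in dataset:
--         for index, itemset in enumerate(itemsets):
--             if itemset.difference(subset) == set():
--                 frequency[index] += 1
--     return frequency
-- ===== SOURCE B (Python) =====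
-- def calc_set_frequency(dataset: list, itemsets: list) -> list:
--     """
--         :param dataset: a dataset of items in a comma separated list
--         :param itemsets: a list of unique items in itemsets to evaluate
--         :return: a list of the frequencies associated with the given itemsets
--     """
--     # Inverted index: item -> set of transaction indices containing it.
--     posting = {}
--     for i, subset in enumerate(dataset):
--         for item in subset:
--             posting.setdefault(item, set()).add(i)
--     full = set(range(len(dataset)))
--     frequency = []
--     for itemset in itemsets:
--         acc = full
--         for item in itemset:
--             acc = acc & posting.get(item, set())
--         frequency.append(len(acc))
--     return frequency
-- ===== Notes on version B (the rewrite author's own statement) =====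
-- stated objective: faster
-- what changed: Replaces the per-transaction scan over all itemsets (a set-difference per pair) with an inverted index built in one pass (item -> set of transaction indices) followed by posting-list intersections per itemset, with the full index set as the empty-itemset default.
import Mathlib
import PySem

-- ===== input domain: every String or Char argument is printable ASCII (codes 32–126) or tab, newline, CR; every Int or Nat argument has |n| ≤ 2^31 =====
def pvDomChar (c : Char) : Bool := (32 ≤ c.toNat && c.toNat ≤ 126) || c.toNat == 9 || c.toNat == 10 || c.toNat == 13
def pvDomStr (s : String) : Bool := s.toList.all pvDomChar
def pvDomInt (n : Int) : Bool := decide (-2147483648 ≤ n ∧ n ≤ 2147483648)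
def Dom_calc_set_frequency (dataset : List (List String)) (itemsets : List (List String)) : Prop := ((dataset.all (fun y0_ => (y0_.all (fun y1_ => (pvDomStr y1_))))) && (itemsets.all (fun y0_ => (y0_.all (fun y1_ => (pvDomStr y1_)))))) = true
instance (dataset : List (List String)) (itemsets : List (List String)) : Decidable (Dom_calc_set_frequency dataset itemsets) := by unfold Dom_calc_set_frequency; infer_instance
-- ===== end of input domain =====

-- B replaces A's per-transaction scan over all itemsets by an inverted index (item -> set of
-- transaction indices) intersected per itemset; objective: faster. Equality proved on all inputs.
-- (dataset/itemsets elements are Python sets; List String holds their distinct elements.)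

-- ===== PORT A =====
-- 'frequency[index] += 1': index comes from enumerate(itemsets), so it is ≥ 0 and < len(frequency);
-- List.set/getD at index.toNat is exactly Python's in-range item assignment/read there.
def calc_set_frequency (dataset : List (List String)) (itemsets : List (List String)) : List Int :=
  let frequency : List Int :=
    (PySem.List.enumerate itemsets 0).foldl (fun f _ => f ++ [(0 : Int)]) []
  dataset.foldl (fun freq subset =>
    (PySem.List.enumerate itemsets 0).foldl (fun freq p =>
      if PySem.Set.equal (PySem.Set.diff p.2 subset) PySem.Set.empty then
        freq.set p.1.toNat (freq.getD p.1.toNat 0 + 1)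
      else freq) freq) frequency

-- ===== PORT B =====
def calc_set_frequency_alt (dataset : List (List String)) (itemsets : List (List String)) : List Int :=
  let posting : PySem.Dict String (PySem.Set Int) :=
    (PySem.List.enumerate dataset 0).foldl (fun d p =>
      p.2.foldl (fun d item =>
        d.insert item (PySem.Set.add (d.getD item PySem.Set.empty) p.1)) d) PySem.Dict.empty
  let full : PySem.Set Int := PySem.Set.ofList (PySem.List.pyRange 0 (dataset.length : Int) 1)
  itemsets.foldl (fun frequency itemset =>
    frequency ++ [PySem.Set.len
      (itemset.foldl (fun acc item =>
        PySem.Set.inter acc (posting.getD item PySem.Set.empty)) full)]) []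

-- ===== PRECONDITION & SPEC =====
def Spec_calc_set_frequency (dataset : List (List String)) (itemsets : List (List String)) (out : List Int) : Prop := out = calc_set_frequency_alt dataset itemsets
instance (dataset : List (List String)) (itemsets : List (List String)) (out : List Int) : Decidable (Spec_calc_set_frequency dataset itemsets out) := by unfold Spec_calc_set_frequency; infer_instance

-- ===== CLAIM (what is proved, stated in full; the proofs are below) =====
def Claim_equal_calc_set_frequency : Prop := ∀ (dataset : List (List String)) (itemsets : List (List String)), Dom_calc_set_frequency dataset itemsets → Spec_calc_set_frequency dataset itemsets (calc_set_frequency dataset itemsets)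

-- ===== LEMMAS AND PROOFS =====

-- the common characterisation: itemset t is contained in subset s
def pvP (t s : List String) : Bool := t.all (fun x => s.contains x)

-- A's membership test equals pvP
theorem pv_cond_eq (t s : List String) :
    PySem.Set.equal (PySem.Set.diff t s) PySem.Set.empty = pvP t s := by
  have hb : ∀ (b c : Bool), (b = true ↔ c = true) → b = c := by decide
  apply hb
  simp [PySem.Set.equal_iff, PySem.Set.mem_diff, pvP, List.all_eq_true,
    PySem.Set.empty]

theorem pv_zipWith_snd {α : Type} :
    ∀ (ts : List α) (bs : List Int), bs.length = ts.length →
      List.zipWith (fun _ c => c) ts bs = bs := by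
  intro ts
  induction ts with
  | nil => intro bs h; simp_all
  | cons t ts ih =>
    intro bs h
    cases bs with
    | nil => simp
    | cons b bs => simp_all

-- zipWith fusion
theorem pv_zipWith_zipWith {α β γ δ : Type} (f : α → γ → δ) (g : α → β → γ) :
    ∀ (ts : List α) (bs : List β),
      List.zipWith f ts (List.zipWith g ts bs) = List.zipWith (fun t b => f t (g t b)) ts bs := by
  intro ts
  induction ts with
  | nil => intro bs; simp
  | cons t ts ih =>
    intro bs
    cases bs with
    | nil => simp
    | cons b bs => simp [ih]

-- zipWith ignoring the second list is map (equal lengths)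
theorem pv_zipWith_left {α β : Type} (f : α → Int) :
    ∀ (ts : List α) (bs : List β), ts.length = bs.length →
      List.zipWith (fun t _ => f t) ts bs = ts.map f := by
  intro ts
  induction ts with
  | nil => intro bs _; simp
  | cons t ts ih =>
    intro bs h
    cases bs with
    | nil => simp at h
    | cons b bs => simp_all

-- A's inner loop over enumerate(itemsets) bumps each counter whose itemset is contained in subset
theorem pvA_inner (subset : List String) :
    ∀ (ts : List (List String)) (pre rest : List Int), rest.length = ts.length →
      (PySem.List.enumerate ts (pre.length : Int)).foldl
        (fun freq p =>
          if PySem.Set.equal (PySem.Set.diff p.2 subset) PySem.Set.empty then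
            freq.set p.1.toNat (freq.getD p.1.toNat 0 + 1)
          else freq)
        (pre ++ rest)
      = pre ++ List.zipWith (fun t c => if pvP t subset then c + 1 else c) ts rest := by
  intro ts
  induction ts with
  | nil =>
    intro pre rest h
    have hr : rest = [] := List.eq_nil_of_length_eq_zero h
    subst hr
    simp [PySem.List.enumerate_nil]
  | cons t ts ih =>
    intro pre rest h
    cases rest with
    | nil => simp at h
    | cons c rest =>
      rw [PySem.List.enumerate_cons]
      simp only [List.foldl_cons, pv_cond_eq, Int.toNat_natCast]
      have hget : (pre ++ c :: rest).getD pre.length 0 = c := by simp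
      have hset : (pre ++ c :: rest).set pre.length (c + 1) = (pre ++ [c + 1]) ++ rest := by
        simp
      have ih' := fun (v : Int) => ih (pre ++ [v]) rest (by simpa using h)
      simp only [pv_cond_eq, List.length_append, List.length_cons, List.length_nil,
        Nat.cast_add, Nat.cast_one, zero_add] at ih'
      by_cases hc : pvP t subset
      · simp only [hc, if_true, hget, hset]
        rw [ih' (c + 1)]
        simp [hc]
      · simp only [hc, Bool.false_eq_true, if_false]
        have hsplit : pre ++ c :: rest = (pre ++ [c]) ++ rest := by simp
        rw [hsplit, ih' c]
        simp [hc]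

-- A's outer loop: pointwise addition of the per-transaction indicators
theorem pvA_outer (itemsets : List (List String)) :
    ∀ (ds : List (List String)) (freq : List Int), freq.length = itemsets.length →
      ds.foldl (fun freq subset =>
        (PySem.List.enumerate itemsets 0).foldl
          (fun freq p =>
            if PySem.Set.equal (PySem.Set.diff p.2 subset) PySem.Set.empty then
              freq.set p.1.toNat (freq.getD p.1.toNat 0 + 1)
            else freq) freq) freq
      = List.zipWith (fun t c => c + (ds.countP (pvP t) : Int)) itemsets freq := by
  intro ds
  induction ds with
  | nil =>
    intro freq h
    simp only [List.foldl_nil, List.countP_nil, Nat.cast_zero, add_zero]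
    exact (pv_zipWith_snd itemsets freq h).symm
  | cons d ds ih =>
    intro freq h
    have hinner := pvA_inner d itemsets [] freq h
    simp only [List.length_nil, Nat.cast_zero, List.nil_append] at hinner
    rw [List.foldl_cons, hinner,
      ih _ (by simp [List.length_zipWith, h]),
      pv_zipWith_zipWith]
    have hfun : (fun (t : List String) (c : Int) =>
        (if pvP t d then c + 1 else c) + ((ds.countP (pvP t) : Nat) : Int))
        = fun t c => c + (((d :: ds).countP (pvP t) : Nat) : Int) := by
      funext t c
      by_cases hc : pvP t d <;> simp [hc] <;> omega

    rw [hfun]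

-- A computes the map of containment counts
theorem pvA_eq (dataset itemsets : List (List String)) :
    calc_set_frequency dataset itemsets
      = itemsets.map (fun t => (dataset.countP (pvP t) : Int)) := by
  unfold calc_set_frequency
  rw [PySem.List.foldl_append_singleton_eq_map]
  rw [pvA_outer itemsets dataset _ (by simp [PySem.List.length_enumerate])]
  rw [List.nil_append, List.zipWith_map_right]
  simp only [zero_add]
  exact pv_zipWith_left (fun t => ((dataset.countP (pvP t) : Nat) : Int)) itemsets
    (PySem.List.enumerate itemsets 0) (by simp [PySem.List.length_enumerate])

-- B: one transaction's items update the posting dict at exactly its members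
theorem pvB_inner (idx : Int) (item : String) :
    ∀ (subset : List String) (d : PySem.Dict String (PySem.Set Int)),
      (subset.foldl (fun d it =>
          d.insert it (PySem.Set.add (d.getD it PySem.Set.empty) idx)) d).getD item PySem.Set.empty
      = if subset.contains item then PySem.Set.add (d.getD item PySem.Set.empty) idx
        else d.getD item PySem.Set.empty := by
  intro subset
  induction subset with
  | nil => intro d; simp
  | cons s rest ih =>
    intro d
    rw [List.foldl_cons, ih]
    by_cases hs : item = s
    · subst hs
      by_cases hr : rest.contains item
      · simp
      · simp
    · by_cases hr : rest.contains item
      · simp [PySem.Dict.getD_insert, hs]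
      · have hne : (s :: rest).contains item = false := by
          simp only [List.contains_cons, Bool.or_eq_false_iff, beq_eq_false_iff_ne, ne_eq]
          exact ⟨hs, by simpa using hr⟩
        simp only [hne, Bool.false_eq_true, if_false]
        rw [if_neg (by simpa using hr), PySem.Dict.getD_insert, if_neg hs]

-- B: the posting list of an item is the fold of Set.add over the transactions containing it
theorem pvB_postD (item : String) :
    ∀ (ds : List (List String)) (s : Int) (d : PySem.Dict String (PySem.Set Int)),
      ((PySem.List.enumerate ds s).foldl (fun d p =>
          p.2.foldl (fun d it =>
            d.insert it (PySem.Set.add (d.getD it PySem.Set.empty) p.1)) d) d).getD item PySem.Set.empty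
      = ((PySem.List.enumerate ds s).filter (fun p => p.2.contains item)).foldl
          (fun acc p => PySem.Set.add acc p.1) (d.getD item PySem.Set.empty) := by
  intro ds
  induction ds with
  | nil => intro s d; simp [PySem.List.enumerate_nil]
  | cons subset ds ih =>
    intro s d
    rw [PySem.List.enumerate_cons]
    simp only [List.foldl_cons, List.filter_cons]
    by_cases hc : subset.contains item
    · simp only [hc, if_pos]
      rw [ih, pvB_inner, if_pos hc]
      simp
    · simp only [hc, Bool.false_eq_true, if_false]
      rw [ih, pvB_inner, if_neg (by simpa using hc)]

-- membership in a posting list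
theorem pvB_post_mem (ds : List (List String)) (item : String) (i : Int) :
    i ∈ ((PySem.List.enumerate ds 0).foldl (fun d p =>
          p.2.foldl (fun d it =>
            d.insert it (PySem.Set.add (d.getD it PySem.Set.empty) p.1)) d)
          PySem.Dict.empty).getD item PySem.Set.empty
      ↔ ∃ k : Nat, k < ds.length ∧ i = (k : Int) ∧ (ds.getD k []).contains item := by
  rw [pvB_postD, PySem.Dict.getD_empty]
  rw [show (fun (acc : PySem.Set Int) (p : Int × List String) => PySem.Set.add acc p.1)
      = (fun acc p => PySem.Set.add acc ((fun (q : Int × List String) => q.1) p)) from rfl]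
  rw [PySem.Set.mem_foldl_add]
  simp only [PySem.Set.empty, List.not_mem_nil, false_or, List.mem_filter,
    PySem.List.mem_enumerate_iff]
  constructor
  · rintro ⟨p, ⟨⟨k, hk, rfl⟩, hcon⟩, rfl⟩
    exact ⟨k, hk, by simp, by simpa [List.getD_eq_getElem?_getD, List.getElem?_eq_getElem hk] using hcon⟩
  · rintro ⟨k, hk, rfl, hcon⟩
    exact ⟨((k : Int), ds[k]), ⟨⟨k, hk, by simp⟩,
      by simpa [List.getD_eq_getElem?_getD, List.getElem?_eq_getElem hk] using hcon⟩, rfl⟩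

-- B: intersecting along an itemset filters by containment in every posting list
theorem pvB_acc (g : String → PySem.Set Int) :
    ∀ (t : List String) (acc : List Int),
      t.foldl (fun acc it => PySem.Set.inter acc (g it)) acc
      = acc.filter (fun i => t.all (fun it => (g it).contains i)) := by
  intro t
  induction t with
  | nil => intro acc; simp
  | cons it rest ih =>
    intro acc
    rw [List.foldl_cons,
      show PySem.Set.inter acc (g it) = acc.filter (fun i => (g it).contains i) from rfl,
      ih, List.filter_filter]
    apply List.filter_congr
    intro x _
    simp [List.all_cons, Bool.and_comm]

theorem pv_contains_iff {α : Type} [BEq α] [LawfulBEq α] (l : List α) (x : α) :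
    l.contains x = true ↔ x ∈ l := by simp

-- counting over range(len(ds)) of a predicate on ds[k] is countP over ds
theorem pv_count_range {α : Type} (p : α → Bool) (dflt : α) :
    ∀ (ds : List α),
      (List.range ds.length).countP (fun k => p (ds.getD k dflt)) = ds.countP p := by
  intro ds
  induction ds using List.reverseRecOn with
  | nil => simp
  | append_singleton ds d ih =>
    rw [List.length_append, List.length_singleton, List.range_succ, List.countP_append,
      List.countP_append]
    congr 1
    · rw [← ih]
      apply List.countP_congr
      intro k hk
      rw [List.mem_range] at hk
      rw [List.getD_append _ _ _ _ hk]
    · simp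

-- B computes the same map of containment counts
theorem pvB_eq (dataset itemsets : List (List String)) :
    calc_set_frequency_alt dataset itemsets
      = itemsets.map (fun t => (dataset.countP (pvP t) : Int)) := by
  unfold calc_set_frequency_alt
  rw [PySem.List.foldl_append_singleton_eq_map]
  rw [List.nil_append]
  apply List.map_congr_left
  intro t _
  rw [pvB_acc]
  rw [PySem.Set.ofList_eq_self_of_nodup _ (PySem.List.nodup_pyRange_one _ _)]
  show ((List.filter _ (PySem.List.pyRange 0 (dataset.length : Int) 1)).length : Int) = _
  rw [← List.countP_eq_length_filter]
  rw [PySem.List.pyRange_one]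
  simp only [sub_zero, Int.toNat_natCast, List.countP_map]
  rw [← pv_count_range (pvP t) ([] : List String) dataset]
  norm_cast
  apply List.countP_congr
  intro k hk
  rw [List.mem_range] at hk
  simp only [Function.comp, zero_add, pvP, List.all_eq_true]
  constructor
  · intro h it hit
    have hm := (pv_contains_iff _ _).1 (h it hit)
    rw [pvB_post_mem] at hm
    obtain ⟨k', hk', hke, hcon⟩ := hm
    have hkk : k' = k := by exact_mod_cast hke.symm
    subst hkk
    exact hcon
  · intro h it hit
    exact (pv_contains_iff _ _).2
      ((pvB_post_mem dataset it ((k : Nat) : Int)).2 ⟨k, hk, rfl, h it hit⟩)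

-- ===== VERDICT (by name: the statement is the Claim_ definition above) =====
theorem calc_set_frequency_spec : Claim_equal_calc_set_frequency := by
  intro dataset itemsets _
  unfold Spec_calc_set_frequency
  rw [pvA_eq, pvB_eq]
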